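-- pv_equiv track=rewrite | github.com/tomorrow9913/Pyrallel-Consumer | benchmarks/process_batch_advisor.py | _format_flag_command
-- ===== SOURCE A (Python) =====
-- from collections.abc import Mapping, Sequence
--
-- def _format_flag_command(flags: Sequence[str]) -> str:
--     pairs: list[str] = []
--     for index in range(0, len(flags), 2):
--         flag = flags[index]
--         try:
--             value = flags[index + 1]
--         except IndexError:
--             pairs.append(flag)
--             continue
--         pairs.append("%s %s" % (flag, value))
--     return " ".join(pairs)
-- ===== SOURCE B (Python) =====
-- def _format_flag_command(flags):
--     # Joining "flag value" pairs with spaces is just joining all tokens with spaces.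
--     return " ".join(flags)
-- ===== Notes on version B (the rewrite author's own statement) =====
-- stated objective: simpler
-- what changed: Replaces the index-stepping pairing loop with try/except by the observation that space-joining the 'flag value' pairs equals space-joining all tokens, so B is a single ' '.join(flags).
import Mathlib
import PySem

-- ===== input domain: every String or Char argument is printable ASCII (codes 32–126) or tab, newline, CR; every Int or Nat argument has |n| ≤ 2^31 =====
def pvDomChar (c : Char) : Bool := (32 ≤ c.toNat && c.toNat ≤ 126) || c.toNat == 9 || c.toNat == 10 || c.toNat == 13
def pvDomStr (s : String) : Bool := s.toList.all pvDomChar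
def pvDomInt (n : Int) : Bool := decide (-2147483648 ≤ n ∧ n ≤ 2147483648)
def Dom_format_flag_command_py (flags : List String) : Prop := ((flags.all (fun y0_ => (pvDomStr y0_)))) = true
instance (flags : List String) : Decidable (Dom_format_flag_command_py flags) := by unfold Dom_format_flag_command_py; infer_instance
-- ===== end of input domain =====

-- B: the index-stepping pairing loop collapses to a single " ".join(flags) (simpler; same result).


-- ===== PORT A =====
-- loop body of 'for index in range(0, len(flags), 2)': flags[index+1] raising IndexError
-- (pyGet? = none) appends the bare flag, otherwise appends "%s %s" % (flag, value);
-- flags[index] itself is always in range, ported as pyGetD.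
def pvFormatBody (flags : List String) (pairs : List String) (index : Int) : List String :=
  match PySem.List.pyGet? flags (index + 1) with
  | none => pairs ++ [PySem.List.pyGetD flags index ""]
  | some value => pairs ++ [PySem.List.pyGetD flags index "" ++ " " ++ value]

def format_flag_command_py (flags : List String) : String :=
  let pairs := (PySem.List.pyRange 0 (flags.length : Int) 2).foldl (pvFormatBody flags) []
  PySem.Str.join " " pairs

-- ===== PORT B =====
def format_flag_command_py_alt (flags : List String) : String :=
  PySem.Str.join " " flags

-- ===== PRECONDITION & SPEC =====
def Spec_format_flag_command_py (flags : List String) (out : String) : Prop := out = format_flag_command_py_alt flags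
instance (flags : List String) (out : String) : Decidable (Spec_format_flag_command_py flags out) := by unfold Spec_format_flag_command_py; infer_instance

-- ===== CLAIM (what is proved, stated in full; the proofs are below) =====
def Claim_equal_format_flag_command_py : Prop := ∀ (flags : List String), Dom_format_flag_command_py flags → Spec_format_flag_command_py flags (format_flag_command_py flags)

-- ===== LEMMAS AND PROOFS =====

-- reference form of A's pairing loop: merge adjacent pairs with a space
def pvPairsOf : List String → List String
  | [] => []
  | [f] => [f]
  | f :: v :: rest => (f ++ " " ++ v) :: pvPairsOf rest

theorem pvRange_two_nil (a b : Int) (h : b ≤ a) : PySem.List.pyRange a b 2 = [] := by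
  rw [PySem.List.pyRange_of_pos a b (by norm_num)]
  rw [if_neg (by omega)]
  simp

theorem pvRange_two_cons (a b : Int) (h : a < b) :
    PySem.List.pyRange a b 2 = a :: PySem.List.pyRange (a + 2) b 2 := by
  rw [PySem.List.pyRange_of_pos a b (by norm_num), PySem.List.pyRange_of_pos (a + 2) b (by norm_num)]
  rw [if_pos h]
  have hcount : ((b - a + 2 - 1) / 2).toNat
      = (if a + 2 < b then ((b - (a + 2) + 2 - 1) / 2).toNat else 0) + 1 := by
    split_ifs with h2 <;> omega
  rw [hcount, List.range_succ_eq_map]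
  simp [List.map_map, Function.comp]
  intro k _
  ring

theorem pvLoop_eq (xs : List String) : ∀ (flags : List String) (i : Nat) (acc : List String),
    flags.drop i = xs →
    (PySem.List.pyRange (i : Int) (flags.length : Int) 2).foldl (pvFormatBody flags) acc
      = acc ++ pvPairsOf xs := by
  induction xs using pvPairsOf.induct with
  | case1 =>
      intro flags i acc hd
      have hlen : flags.length ≤ i := by
        have := congrArg List.length hd; simp at this; omega
      rw [pvRange_two_nil _ _ (by exact_mod_cast hlen)]
      simp [pvPairsOf]
  | case2 f =>
      intro flags i acc hd
      have hlen : flags.length = i + 1 := by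
        have := congrArg List.length hd; simp at this; omega
      have hi : (i : Int) < (flags.length : Int) := by exact_mod_cast by omega
      rw [pvRange_two_cons _ _ hi, List.foldl_cons,
          pvRange_two_nil _ _ (by exact_mod_cast by omega : (flags.length : Int) ≤ (i : Int) + 2)]
      have hget1 : flags[i + 1]? = none := by
        rw [List.getElem?_eq_none_iff]; omega
      have hget0 : flags.getD i "" = f := by
        have : (flags.drop i).getD 0 "" = f := by rw [hd]; rfl
        simpa [List.getD, List.getElem?_drop] using this
      simp only [pvFormatBody, List.foldl_nil]
      have h1 : (i : Int) + 1 = ((i + 1 : Nat) : Int) := by push_cast; ring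
      rw [h1, PySem.List.pyGet?_natCast, hget1]
      rw [PySem.List.pyGetD_natCast, hget0]
      simp [pvPairsOf]
  | case3 f v rest ih =>
      intro flags i acc hd
      have hlen : i + 2 ≤ flags.length := by
        have := congrArg List.length hd; simp at this; omega
      have hi : (i : Int) < (flags.length : Int) := by exact_mod_cast by omega
      rw [pvRange_two_cons _ _ hi, List.foldl_cons]
      have hget1 : flags[i + 1]? = some v := by
        have : (flags.drop i)[1]? = some v := by rw [hd]; rfl
        rwa [List.getElem?_drop] at this
      have hget0 : flags.getD i "" = f := by
        have : (flags.drop i).getD 0 "" = f := by rw [hd]; rfl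
        simpa [List.getD, List.getElem?_drop] using this
      have hdrop : flags.drop (i + 2) = rest := by
        rw [← List.drop_drop, hd]; rfl
      simp only [pvFormatBody]
      have h1 : (i : Int) + 1 = ((i + 1 : Nat) : Int) := by push_cast; ring
      rw [h1, PySem.List.pyGet?_natCast, hget1]
      rw [PySem.List.pyGetD_natCast, hget0]
      have h2 : (i : Int) + 2 = ((i + 2 : Nat) : Int) := by push_cast; ring
      rw [h2, ih flags (i + 2) _ hdrop]
      simp [pvPairsOf]

theorem pvJoin_cons_cons (s x y : List Char) (l : List (List Char)) :
    PySem.Chars.join s (x :: y :: l) = x ++ s ++ PySem.Chars.join s (y :: l) := by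
  simp [PySem.Chars.join, List.intercalate, List.intersperse]

theorem pvJoin_pairsOf (flags : List String) :
    PySem.Str.join " " (pvPairsOf flags) = PySem.Str.join " " flags := by
  unfold PySem.Str.join
  congr 1
  induction flags using pvPairsOf.induct with
  | case1 => rfl
  | case2 f => rfl
  | case3 f v rest ih =>
      have hto : (f ++ " " ++ v).toList = f.toList ++ [' '] ++ v.toList := by
        simp [String.toList_append]
      have hsep : " ".toList = [' '] := rfl
      cases rest with
      | nil =>
          show PySem.Chars.join " ".toList [(f ++ " " ++ v).toList]
              = PySem.Chars.join " ".toList [f.toList, v.toList]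
          rw [pvJoin_cons_cons, hto, hsep]
          simp [PySem.Chars.join, List.intercalate, List.intersperse]
      | cons c l =>
          obtain ⟨p, ps, hpc⟩ : ∃ p ps,
              List.map String.toList (pvPairsOf (c :: l)) = p :: ps := by
            cases l <;> exact ⟨_, _, rfl⟩
          simp only [pvPairsOf, List.map_cons] at ih ⊢
          rw [hpc] at ih ⊢
          rw [hsep] at ih
          rw [hsep, pvJoin_cons_cons, hto,
              pvJoin_cons_cons [' '] f.toList,
              pvJoin_cons_cons [' '] v.toList, ih]
          simp [List.append_assoc]

-- ===== VERDICT (by name: the statement is the Claim_ definition above) =====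
theorem format_flag_command_py_spec : Claim_equal_format_flag_command_py := by
  intro flags _
  show format_flag_command_py flags = format_flag_command_py_alt flags
  unfold format_flag_command_py format_flag_command_py_alt
  have h0 : ((0 : Int)) = ((0 : Nat) : Int) := rfl
  rw [h0, pvLoop_eq flags flags 0 [] (by simp)]
  simpa using pvJoin_pairsOf flags
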